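-- pv_equiv track=rewrite | github.com/ne0h007/Learning_algo | leetCode_75/sliding_window/max_consecutive_zeros_3.py | maxOnes_naive
-- ===== SOURCE A (Python) =====
-- def maxOnes_naive(arr, k):
--     res = 0
--
--     # Exploring all subarrays
--     for i in range(len(arr)):
--
--         # Counter for zeroes
--         cnt = 0
--         for j in range(i, len(arr)):
--             if arr[j] == 0:
--                 cnt += 1
--
--             # If cnt is less than or equal to k, then
--             # all zeroes can be flipped to one
--             if cnt <= k:
--                 res = max(res, j - i + 1)
--
--     return res
-- ===== SOURCE B (Python) =====
-- def maxOnes_naive(arr, k):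
--     res = 0
--     l = 0
--     cnt = 0
--     for r in range(len(arr)):
--         if arr[r] == 0:
--             cnt += 1
--         while cnt > k and l <= r:
--             if arr[l] == 0:
--                 cnt -= 1
--             l += 1
--         res = max(res, r - l + 1)
--     return res
-- ===== Notes on version B (the rewrite author's own statement) =====
-- stated objective: faster
-- what changed: Replaced A's enumeration of all O(n^2) subarrays (nested loops with a per-start zero counter) by a single-pass two-pointer sliding window that maintains the zero count of the current window and advances the left pointer when it exceeds k.
import Mathlib
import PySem

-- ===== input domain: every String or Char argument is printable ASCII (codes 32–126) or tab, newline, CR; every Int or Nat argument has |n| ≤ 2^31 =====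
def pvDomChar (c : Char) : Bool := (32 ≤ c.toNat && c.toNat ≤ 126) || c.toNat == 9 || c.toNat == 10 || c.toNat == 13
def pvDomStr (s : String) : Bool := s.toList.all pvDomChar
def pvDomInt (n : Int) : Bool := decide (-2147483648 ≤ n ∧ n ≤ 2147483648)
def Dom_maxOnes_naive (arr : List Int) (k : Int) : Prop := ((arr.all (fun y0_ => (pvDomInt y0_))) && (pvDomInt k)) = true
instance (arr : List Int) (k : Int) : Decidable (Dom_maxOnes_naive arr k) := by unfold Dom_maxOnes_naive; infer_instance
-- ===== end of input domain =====

-- B replaces A's O(n^2) scan of all subarrays by a one-pass two-pointer sliding window (O(n)).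

-- ===== PORT A =====
-- inner-loop body of A: updates (res, cnt) at index j for the window starting at i
def stepAInner (arr : List Int) (k : Int) (i : Int) (s : Int × Int) (j : Int) : Int × Int :=
  let cnt := if PySem.List.pyGetD arr j 0 == 0 then s.2 + 1 else s.2
  (if cnt ≤ k then max s.1 (j - i + 1) else s.1, cnt)

def maxOnes_naive (arr : List Int) (k : Int) : Int :=
  (PySem.List.pyRange 0 arr.length 1).foldl
    (fun res i => ((PySem.List.pyRange i arr.length 1).foldl (stepAInner arr k i) (res, 0)).1) 0

-- ===== PORT B =====
-- B's inner while loop: advance l while cnt > k and l <= r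
def shrinkB (arr : List Int) (k : Int) (r : Int) (l : Int) (cnt : Int) : Int × Int :=
  if h : cnt > k ∧ l ≤ r then
    shrinkB arr k r (l + 1) (if PySem.List.pyGetD arr l 0 == 0 then cnt - 1 else cnt)
  else (l, cnt)
termination_by (r + 1 - l).toNat
decreasing_by simp_wf; omega

def maxOnes_naive_alt (arr : List Int) (k : Int) : Int :=
  ((PySem.List.pyRange 0 arr.length 1).foldl
    (fun (s : Int × Int × Int) r =>
      let cnt := if PySem.List.pyGetD arr r 0 == 0 then s.2.2 + 1 else s.2.2
      let lc := shrinkB arr k r s.2.1 cnt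
      (max s.1 (r - lc.1 + 1), lc.1, lc.2)) (0, 0, 0)).1

-- ===== PRECONDITION & SPEC =====
def Spec_maxOnes_naive (arr : List Int) (k : Int) (out : Int) : Prop := out = maxOnes_naive_alt arr k
instance (arr : List Int) (k : Int) (out : Int) : Decidable (Spec_maxOnes_naive arr k out) := by unfold Spec_maxOnes_naive; infer_instance

-- ===== CLAIM (what is proved, stated in full; the proofs are below) =====
def Claim_equal_maxOnes_naive : Prop := ∀ (arr : List Int) (k : Int), Dom_maxOnes_naive arr k → Spec_maxOnes_naive arr k (maxOnes_naive arr k)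

-- ===== LEMMAS AND PROOFS =====

-- number of zeros among the first m elements
def zp (arr : List Int) (m : Nat) : Int := ((arr.take m).countP (fun x => x == 0) : Int)

-- the window arr[l..r] (inclusive) has at most k zeros
abbrev pvValid (arr : List Int) (k : Int) (l r : Nat) : Prop := zp arr (r + 1) - zp arr l ≤ k

-- stopping predicate of B's while loop at right end r
abbrev pvP (arr : List Int) (k : Int) (r l : Nat) : Prop := pvValid arr k l r ∨ l = r + 1

theorem pvLex (arr : List Int) (k : Int) (r : Nat) : ∃ l, pvP arr k r l := ⟨r + 1, Or.inr rfl⟩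

-- minimal left end l with pvP arr k r l
def pvL (arr : List Int) (k : Int) (r : Nat) : Nat := Nat.find (pvLex arr k r)

-- A's candidate value for the window [i, j]
def pvW (arr : List Int) (k : Int) (i j : Nat) : Int :=
  if pvValid arr k i j then (j : Int) - (i : Int) + 1 else 0

-- B's candidate value at right end r
def pvG (arr : List Int) (k : Int) (r : Nat) : Int := (r : Int) + 1 - (pvL arr k r : Int)

def pvM (l : List Int) : Int := l.foldl max 0

def pvWs (arr : List Int) (k : Int) (m : Nat) : List Int :=
  (List.range m).flatMap (fun i => (List.range' i (arr.length - i)).map (fun j => pvW arr k i j))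

def pvLpred (arr : List Int) (k : Int) (m : Nat) : Nat :=
  match m with
  | 0 => 0
  | m + 1 => pvL arr k m

-- basic max-fold lemmas
theorem foldl_max_init (l : List Int) (a : Int) : a ≤ l.foldl max a := by
  induction l generalizing a with
  | nil => simp
  | cons x xs ih => exact le_trans (le_max_left a x) (ih (max a x))

theorem le_foldl_max (l : List Int) (a x : Int) (hx : x ∈ l) : x ≤ l.foldl max a := by
  induction l generalizing a with
  | nil => cases hx
  | cons y ys ih =>
    rcases List.mem_cons.mp hx with rfl | h
    · exact le_trans (le_max_right a x) (foldl_max_init ys (max a x))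
    · exact ih (max a y) h

theorem foldl_max_le (l : List Int) (a c : Int) (ha : a ≤ c) (h : ∀ x ∈ l, x ≤ c) :
    l.foldl max a ≤ c := by
  induction l generalizing a with
  | nil => exact ha
  | cons x xs ih =>
    exact ih (max a x) (max_le ha (h x (List.mem_cons_self))) (fun y hy => h y (List.mem_cons_of_mem _ hy))

theorem pvM_nonneg (l : List Int) : 0 ≤ pvM l := foldl_max_init l 0

-- zp lemmas
theorem zp_succ (arr : List Int) (m : Nat) (h : m < arr.length) :
    zp arr (m + 1) = zp arr m + (if PySem.List.pyGetD arr (m : Int) 0 == 0 then 1 else 0) := by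
  unfold zp
  have hg : arr[m]? = some arr[m] := List.getElem?_eq_getElem h
  rw [List.take_add_one, hg, List.countP_append]
  simp only [PySem.List.pyGetD_natCast, List.getD_eq_getElem?_getD, hg, Option.getD_some]
  by_cases hz : arr[m] == 0 <;> simp [hz]

theorem zp_mono (arr : List Int) (a b : Nat) (h : a ≤ b) : zp arr a ≤ zp arr b := by
  unfold zp
  have h1 : arr.take a = (arr.take b).take a := by rw [List.take_take, Nat.min_eq_left h]
  have h2 : List.Sublist ((arr.take b).take a) (arr.take b) := List.take_sublist _ _
  rw [h1]
  exact_mod_cast List.Sublist.countP_le h2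

-- pvL lemmas
theorem pvL_spec (arr : List Int) (k : Int) (r : Nat) : pvP arr k r (pvL arr k r) :=
  Nat.find_spec (pvLex arr k r)

theorem pvL_min' (arr : List Int) (k : Int) (r l : Nat) (h : pvP arr k r l) : pvL arr k r ≤ l :=
  Nat.find_min' (pvLex arr k r) h

theorem pvL_min (arr : List Int) (k : Int) (r l : Nat) (h : l < pvL arr k r) : ¬ pvP arr k r l :=
  Nat.find_min (pvLex arr k r) h

theorem pvL_le (arr : List Int) (k : Int) (r : Nat) : pvL arr k r ≤ r + 1 :=
  pvL_min' arr k r (r + 1) (Or.inr rfl)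

theorem pvL_mono (arr : List Int) (k : Int) (r : Nat) : pvL arr k r ≤ pvL arr k (r + 1) := by
  rcases pvL_spec arr k (r + 1) with h | h
  · refine pvL_min' arr k r _ (Or.inl ?_)
    unfold pvValid at h ⊢
    have := zp_mono arr (r + 1) (r + 2) (by omega)
    have e : zp arr (r + 1 + 1) = zp arr (r + 2) := rfl
    omega
  · have := pvL_le arr k r
    omega

theorem pvLpred_le (arr : List Int) (k : Int) (m : Nat) : pvLpred arr k m ≤ pvL arr k m := by
  cases m with
  | zero => exact Nat.zero_le _
  | succ m => exact pvL_mono arr k m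

-- A's inner loop computes the running max of pvW values
theorem innerA (arr : List Int) (k : Int) (i : Nat) :
    ∀ t (j0 : Nat), arr.length - j0 = t → j0 ≤ arr.length → ∀ res : Int, 0 ≤ res →
      ((PySem.List.pyRange (j0 : Int) (arr.length : Int) 1).foldl (stepAInner arr k (i : Int))
        (res, zp arr j0 - zp arr i)).1
      = List.foldl max res ((List.range' j0 (arr.length - j0)).map (fun j => pvW arr k i j)) := by
  intro t
  induction t with
  | zero =>
    intro j0 ht hle res hres
    have hj : j0 = arr.length := by omega
    subst hj
    rw [PySem.List.pyRange_one_eq_nil le_rfl]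
    simp
  | succ t ih =>
    intro j0 ht hle res hres
    have hj : j0 < arr.length := by omega
    rw [PySem.List.pyRange_one_cons (by exact_mod_cast hj), List.foldl_cons]
    have hstep : stepAInner arr k (i : Int) (res, zp arr j0 - zp arr i) (j0 : Int)
        = (max res (pvW arr k i j0), zp arr (j0 + 1) - zp arr i) := by
      unfold stepAInner
      have hcnt : (if PySem.List.pyGetD arr (j0 : Int) 0 == 0 then (zp arr j0 - zp arr i) + 1
          else (zp arr j0 - zp arr i)) = zp arr (j0 + 1) - zp arr i := by
        rw [zp_succ arr j0 hj]; split <;> ring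
      dsimp only
      rw [hcnt]
      unfold pvW pvValid
      split
      · rfl
      · rw [max_eq_left hres]
    rw [hstep]
    have hcast : ((j0 : Int) + 1) = (((j0 + 1 : Nat)) : Int) := by push_cast; ring
    rw [hcast]
    have hres' : 0 ≤ max res (pvW arr k i j0) := le_trans hres (le_max_left _ _)
    rw [ih (j0 + 1) (by omega) (by omega) _ hres']
    rw [show arr.length - j0 = t + 1 by omega, List.range'_succ, List.map_cons, List.foldl_cons,
      show arr.length - (j0 + 1) = t by omega]

-- A's value is the max of all pvW values
theorem outerA (arr : List Int) (k : Int) :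
    ∀ m, m ≤ arr.length →
      (PySem.List.pyRange 0 (m : Int) 1).foldl
        (fun res i => ((PySem.List.pyRange i (arr.length : Int) 1).foldl (stepAInner arr k i) (res, 0)).1) 0
      = pvM (pvWs arr k m) := by
  intro m
  induction m with
  | zero =>
    intro _
    rw [show ((0 : Nat) : Int) = (0 : Int) from rfl, PySem.List.pyRange_one_eq_nil le_rfl]
    simp [pvWs, pvM]
  | succ m ih =>
    intro hle
    have hm : m ≤ arr.length := by omega
    have h0m : (0 : Int) ≤ (m : Int) := by positivity
    rw [show ((m + 1 : Nat) : Int) = (m : Int) + 1 by push_cast; ring,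
      PySem.List.pyRange_one_succ_right h0m, List.foldl_append, ih hm, List.foldl_cons,
      List.foldl_nil]
    have hA := innerA arr k m (arr.length - m) m rfl hm (pvM (pvWs arr k m)) (pvM_nonneg _)
    rw [sub_self] at hA
    rw [hA]
    unfold pvWs pvM
    rw [List.range_succ, List.flatMap_append, List.flatMap_cons, List.flatMap_nil,
      List.append_nil, List.foldl_append]

-- B's while loop reaches exactly the minimal left end pvL
theorem shrink_eq (arr : List Int) (k : Int) (r : Nat) (hr : r < arr.length) :
    ∀ t (l0 : Nat), pvL arr k r - l0 = t → l0 ≤ pvL arr k r →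
      shrinkB arr k (r : Int) (l0 : Int) (zp arr (r + 1) - zp arr l0)
        = ((pvL arr k r : Int), zp arr (r + 1) - zp arr (pvL arr k r)) := by
  intro t
  induction t with
  | zero =>
    intro l0 ht hle
    have hl : l0 = pvL arr k r := by omega
    subst hl
    rw [shrinkB]
    rw [dif_neg]
    rcases pvL_spec arr k r with h | h
    · unfold pvValid at h
      intro hc
      omega
    · intro hc
      have h2 := hc.2
      omega
  | succ t ih =>
    intro l0 ht hle
    have hlt : l0 < pvL arr k r := by omega
    have hnp := pvL_min arr k r l0 hlt
    have hLle := pvL_le arr k r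
    have hl0r : l0 ≤ r := by omega
    have hnv : ¬ pvValid arr k l0 r := fun hv => hnp (Or.inl hv)
    unfold pvValid at hnv
    rw [shrinkB, dif_pos ⟨by omega, by exact_mod_cast hl0r⟩]
    have hcnt : (if PySem.List.pyGetD arr (l0 : Int) 0 == 0 then (zp arr (r + 1) - zp arr l0) - 1
        else (zp arr (r + 1) - zp arr l0)) = zp arr (r + 1) - zp arr (l0 + 1) := by
      rw [zp_succ arr l0 (by omega)]; split <;> ring
    rw [hcnt, show ((l0 : Int) + 1) = (((l0 + 1 : Nat)) : Int) by push_cast; ring]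
    exact ih (l0 + 1) (by omega) (by omega)

-- B's value is the max of all pvG values
theorem outerB (arr : List Int) (k : Int) :
    ∀ m, m ≤ arr.length →
      (PySem.List.pyRange 0 (m : Int) 1).foldl
        (fun (s : Int × Int × Int) r =>
          let cnt := if PySem.List.pyGetD arr r 0 == 0 then s.2.2 + 1 else s.2.2
          let lc := shrinkB arr k r s.2.1 cnt
          (max s.1 (r - lc.1 + 1), lc.1, lc.2)) (0, 0, 0)
      = (pvM ((List.range m).map (fun r => pvG arr k r)), (pvLpred arr k m : Int),
          zp arr m - zp arr (pvLpred arr k m)) := by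
  intro m
  induction m with
  | zero =>
    intro _
    rw [show ((0 : Nat) : Int) = (0 : Int) from rfl, PySem.List.pyRange_one_eq_nil le_rfl]
    simp [pvM, pvLpred, zp]
  | succ m ih =>
    intro hle
    have hm : m < arr.length := by omega
    have h0m : (0 : Int) ≤ (m : Int) := by positivity
    rw [show ((m + 1 : Nat) : Int) = (m : Int) + 1 by push_cast; ring,
      PySem.List.pyRange_one_succ_right h0m, List.foldl_append, ih (by omega), List.foldl_cons,
      List.foldl_nil]
    dsimp only
    have hcnt : (if PySem.List.pyGetD arr (m : Int) 0 == 0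
        then (zp arr m - zp arr (pvLpred arr k m)) + 1
        else (zp arr m - zp arr (pvLpred arr k m)))
        = zp arr (m + 1) - zp arr (pvLpred arr k m) := by
      rw [zp_succ arr m hm]; split <;> ring
    rw [hcnt]
    rw [shrink_eq arr k m hm (pvL arr k m - pvLpred arr k m) (pvLpred arr k m) rfl
      (pvLpred_le arr k m)]
    have hg : max (pvM ((List.range m).map (fun r => pvG arr k r)))
        ((m : Int) - (pvL arr k m : Int) + 1)
        = pvM ((List.range (m + 1)).map (fun r => pvG arr k r)) := by
      unfold pvM
      rw [List.range_succ, List.map_append, List.foldl_append, List.map_cons, List.map_nil,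
        List.foldl_cons, List.foldl_nil]
      unfold pvG
      ring_nf
    rw [hg]
    rfl

theorem wg (arr : List Int) (k : Int) (i j : Nat) :
    pvW arr k i j ≤ pvG arr k j := by
  unfold pvW pvG
  split
  · next h =>
    have := pvL_min' arr k j i (Or.inl h)
    omega
  · have := pvL_le arr k j
    omega

theorem g_le (arr : List Int) (k : Int) (r : Nat) (hr : r < arr.length) :
    pvG arr k r ≤ pvM (pvWs arr k arr.length) := by
  by_cases hL : pvL arr k r ≤ r
  · have hv : pvValid arr k (pvL arr k r) r := by
      rcases pvL_spec arr k r with h | h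
      · exact h
      · omega
    have hmem : pvW arr k (pvL arr k r) r ∈ pvWs arr k arr.length := by
      unfold pvWs
      refine List.mem_flatMap.mpr ⟨pvL arr k r, List.mem_range.mpr (by omega), ?_⟩
      exact List.mem_map.mpr ⟨r, List.mem_range'_1.mpr ⟨hL, by omega⟩, rfl⟩
    have heq : pvG arr k r = pvW arr k (pvL arr k r) r := by
      unfold pvG pvW
      rw [if_pos hv]
      ring
    rw [heq]
    exact le_foldl_max _ 0 _ hmem
  · have h1 : pvL arr k r = r + 1 := by have := pvL_le arr k r; omega
    have : pvG arr k r = 0 := by unfold pvG; rw [h1]; push_cast; ring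
    rw [this]
    exact pvM_nonneg _

theorem M_eq (arr : List Int) (k : Int) :
    pvM (pvWs arr k arr.length) = pvM ((List.range arr.length).map (fun r => pvG arr k r)) := by
  apply le_antisymm
  · apply foldl_max_le _ 0 _ (pvM_nonneg _)
    intro x hx
    unfold pvWs at hx
    rcases List.mem_flatMap.mp hx with ⟨i, hi, hx⟩
    rcases List.mem_map.mp hx with ⟨j, hj, rfl⟩
    have hi' := List.mem_range.mp hi
    have hj' := List.mem_range'_1.mp hj
    have hjn : j < arr.length := by omega
    refine le_trans (wg arr k i j) ?_
    exact le_foldl_max _ 0 _ (List.mem_map.mpr ⟨j, List.mem_range.mpr hjn, rfl⟩)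
  · apply foldl_max_le _ 0 _ (pvM_nonneg _)
    intro x hx
    rcases List.mem_map.mp hx with ⟨r, hr, rfl⟩
    exact g_le arr k r (List.mem_range.mp hr)

-- ===== VERDICT (by name: the statement is the Claim_ definition above) =====
theorem maxOnes_naive_spec : Claim_equal_maxOnes_naive := by
  intro arr k _
  unfold Spec_maxOnes_naive maxOnes_naive maxOnes_naive_alt
  rw [outerA arr k arr.length le_rfl, outerB arr k arr.length le_rfl]
  exact M_eq arr k
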